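-- pv_equiv track=rewrite | github.com/JialinWangClaire/Multi-objective-book-recommender-system | al5的副本.py | decode2
-- ===== SOURCE A (Python) =====
-- def decode2(x,n,w,c):
--     s=[]#储存被选择物体的下标集合
--     g=0
--     f=0
--     for i in range(n):
--         if (x[i] == '1'):
--             g = g+w[i]
--             f = f+c[i]
--             s.append(i)
--     return g,f,s
-- ===== SOURCE B (Python) =====
-- def decode2(x, n, w, c):
--     # Divide and conquer over the index range [lo, hi): split in half,
--     # solve each half, combine (totals add, index lists concatenate in order).
--     def go(lo, hi):
--         if hi - lo <= 0:
--             return 0, 0, []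
--         if hi - lo == 1:
--             if x[lo] == '1':
--                 return w[lo], c[lo], [lo]
--             return 0, 0, []
--         mid = (lo + hi) // 2
--         g1, f1, s1 = go(lo, mid)
--         g2, f2, s2 = go(mid, hi)
--         return g1 + g2, f1 + f2, s1 + s2
--     return go(0, max(n, 0))
-- ===== Notes on version B (the rewrite author's own statement) =====
-- stated objective: alternative
-- what changed: Replaces the fused left-to-right accumulation loop with a divide-and-conquer recursion that splits the index range in half, solves each half independently and combines the subtotals and index sublists.
import Mathlib
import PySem

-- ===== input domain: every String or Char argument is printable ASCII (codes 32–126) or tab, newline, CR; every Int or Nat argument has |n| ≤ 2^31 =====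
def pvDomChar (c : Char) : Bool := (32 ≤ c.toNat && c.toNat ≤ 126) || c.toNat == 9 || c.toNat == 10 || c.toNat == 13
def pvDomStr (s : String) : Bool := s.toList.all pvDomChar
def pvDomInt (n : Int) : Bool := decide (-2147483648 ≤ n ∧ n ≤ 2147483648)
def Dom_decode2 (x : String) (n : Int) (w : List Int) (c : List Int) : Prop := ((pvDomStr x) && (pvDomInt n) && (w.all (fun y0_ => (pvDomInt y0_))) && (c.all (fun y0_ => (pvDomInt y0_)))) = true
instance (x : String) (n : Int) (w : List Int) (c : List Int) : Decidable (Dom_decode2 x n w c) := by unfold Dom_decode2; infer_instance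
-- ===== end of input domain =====

-- ===== PORT A =====
-- B replaces A's fused left-to-right accumulation loop by a divide-and-conquer recursion
-- over the index range; equivalence is about return values (no observable side effects).
def decode2 (x : String) (n : Int) (w : List Int) (c : List Int) : Int × Int × List Int :=
  (PySem.List.pyRange 0 n 1).foldl
    (fun (st : Int × Int × List Int) i =>
      if PySem.List.pyGetD x.toList i ' ' = '1' then
        (st.1 + PySem.List.pyGetD w i 0, st.2.1 + PySem.List.pyGetD c i 0, st.2.2 ++ [i])
      else st)
    (0, 0, [])

-- ===== PORT B =====
-- 'go(lo, hi)' of Source B: split [lo, hi) at the floor midpoint, combine the halves.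
def decode2Go (cs : List Char) (w c : List Int) (lo hi : Int) : Int × Int × List Int :=
  if _h0 : hi - lo ≤ 0 then (0, 0, [])
  else if _h1 : hi - lo = 1 then
    if PySem.List.pyGetD cs lo ' ' = '1' then
      (PySem.List.pyGetD w lo 0, PySem.List.pyGetD c lo 0, [lo])
    else (0, 0, [])
  else
    let mid := PySem.Int.floordiv (lo + hi) 2
    let r1 := decode2Go cs w c lo mid
    let r2 := decode2Go cs w c mid hi
    (r1.1 + r2.1, r1.2.1 + r2.2.1, r1.2.2 ++ r2.2.2)
termination_by (hi - lo).toNat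
decreasing_by
  · have h := PySem.Int.floordiv_two_mid_bounds (lo := lo) (hi := hi) (by omega)
    have h2 : 2 * PySem.Int.floordiv (lo + hi) 2 ≤ lo + hi ∧ lo + hi < 2 * (PySem.Int.floordiv (lo + hi) 2 + 1) := by
      constructor
      · have := (PySem.Int.le_floordiv_iff_mul_le (a := lo + hi) (b := 2)
          (q := PySem.Int.floordiv (lo + hi) 2) (by omega)).mp le_rfl
        omega
      · have := (PySem.Int.floordiv_lt_iff_lt_mul (a := lo + hi) (b := 2)
          (q := PySem.Int.floordiv (lo + hi) 2 + 1) (by omega)).mp (by omega)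
        omega
    omega
  · have h := PySem.Int.floordiv_two_mid_bounds (lo := lo) (hi := hi) (by omega)
    have h2 : 2 * PySem.Int.floordiv (lo + hi) 2 ≤ lo + hi ∧ lo + hi < 2 * (PySem.Int.floordiv (lo + hi) 2 + 1) := by
      constructor
      · have := (PySem.Int.le_floordiv_iff_mul_le (a := lo + hi) (b := 2)
          (q := PySem.Int.floordiv (lo + hi) 2) (by omega)).mp le_rfl
        omega
      · have := (PySem.Int.floordiv_lt_iff_lt_mul (a := lo + hi) (b := 2)
          (q := PySem.Int.floordiv (lo + hi) 2 + 1) (by omega)).mp (by omega)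
        omega
    omega

def decode2_alt (x : String) (n : Int) (w : List Int) (c : List Int) : Int × Int × List Int :=
  decode2Go x.toList w c 0 (max n 0)

-- ===== PRECONDITION & SPEC =====
-- Pre_ excludes exactly the inputs where Python A raises IndexError: an index i < n beyond
-- len(x), or a selected index (x[i]=='1') beyond len(w) or len(c). B raises there too.
def Pre_decode2 (x : String) (n : Int) (w : List Int) (c : List Int) : Prop :=
  n ≤ (x.toList.length : Int) ∧
  ∀ i ∈ List.range n.toNat, x.toList.getD i ' ' = '1' → i < w.length ∧ i < c.length
instance (x : String) (n : Int) (w : List Int) (c : List Int) : Decidable (Pre_decode2 x n w c) := by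
  unfold Pre_decode2; infer_instance
def pvWitness_decode2 : String × Int × List Int × List Int := ("101", 3, [1, 2, 3], [4, 5, 6])
def Spec_decode2 (x : String) (n : Int) (w : List Int) (c : List Int) (out : Int × Int × List Int) : Prop := out = decode2_alt x n w c
instance (x : String) (n : Int) (w : List Int) (c : List Int) (out : Int × Int × List Int) : Decidable (Spec_decode2 x n w c out) := by unfold Spec_decode2; infer_instance

-- ===== CLAIM (what is proved, stated in full; the proofs are below) =====
def Claim_equal_decode2 : Prop := ∀ (x : String) (n : Int) (w : List Int) (c : List Int), Dom_decode2 x n w c → Pre_decode2 x n w c → Spec_decode2 x n w c (decode2 x n w c)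

-- ===== LEMMAS AND PROOFS =====
-- the common normal form: totals and index list as filter/map/sum over an index list
def decode2Triple (cs : List Char) (w c : List Int) (l : List Int) : Int × Int × List Int :=
  (((l.filter (fun i => decide (PySem.List.pyGetD cs i ' ' = '1'))).map
      (fun i => PySem.List.pyGetD w i 0)).sum,
   ((l.filter (fun i => decide (PySem.List.pyGetD cs i ' ' = '1'))).map
      (fun i => PySem.List.pyGetD c i 0)).sum,
   l.filter (fun i => decide (PySem.List.pyGetD cs i ' ' = '1')))

lemma decode2_fold_split (cs : List Char) (w c : List Int) (l : List Int) :
    ∀ (g f : Int) (s : List Int),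
      l.foldl
        (fun (st : Int × Int × List Int) i =>
          if PySem.List.pyGetD cs i ' ' = '1' then
            (st.1 + PySem.List.pyGetD w i 0, st.2.1 + PySem.List.pyGetD c i 0, st.2.2 ++ [i])
          else st)
        (g, f, s)
      = (g + (decode2Triple cs w c l).1, f + (decode2Triple cs w c l).2.1,
         s ++ (decode2Triple cs w c l).2.2) := by
  induction l with
  | nil => intro g f s; simp [decode2Triple]
  | cons i t ih =>
    intro g f s
    by_cases h : PySem.List.pyGetD cs i ' ' = '1' <;>
      simp [decode2Triple, List.foldl_cons, h, ih, add_assoc]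

lemma decode2Triple_append (cs : List Char) (w c : List Int) (l1 l2 : List Int) :
    decode2Triple cs w c (l1 ++ l2)
      = ((decode2Triple cs w c l1).1 + (decode2Triple cs w c l2).1,
         (decode2Triple cs w c l1).2.1 + (decode2Triple cs w c l2).2.1,
         (decode2Triple cs w c l1).2.2 ++ (decode2Triple cs w c l2).2.2) := by
  simp [decode2Triple, List.filter_append]

lemma decode2Go_eq_triple (cs : List Char) (w c : List Int) (lo hi : Int) :
    decode2Go cs w c lo hi = decode2Triple cs w c (PySem.List.pyRange lo hi 1) := by
  fun_induction decode2Go cs w c lo hi with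
  | case1 lo hi h0 =>
    rw [PySem.List.pyRange_one_eq_nil (by omega)]
    simp [decode2Triple]
  | case2 lo hi h0 h1 h =>
    rw [show hi = lo + 1 by omega, PySem.List.pyRange_one_singleton]
    simp [decode2Triple, h]
  | case3 lo hi h0 h1 h =>
    rw [show hi = lo + 1 by omega, PySem.List.pyRange_one_singleton]
    simp [decode2Triple, h]
  | case4 lo hi h0 h1 mid r1 r2 ih1 ih2 =>
    have hb := PySem.Int.floordiv_two_mid_bounds (lo := lo) (hi := hi) (by omega)
    rw [PySem.List.pyRange_one_append lo mid hi hb.1 hb.2, decode2Triple_append]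
    simp only [r1, r2, ih1, ih2]

lemma decode2_pyRange_max (n : Int) : PySem.List.pyRange 0 (max n 0) 1 = PySem.List.pyRange 0 n 1 := by
  by_cases h : 0 ≤ n
  · rw [max_eq_left h]
  · rw [max_eq_right (by omega : n ≤ (0:Int)), PySem.List.pyRange_one_eq_nil (by omega),
        PySem.List.pyRange_one_eq_nil (by omega)]

-- ===== VERDICT (by name: the statement is the Claim_ definition above) =====
theorem decode2_spec : Claim_equal_decode2 := by
  intro x n w c _ _
  unfold Spec_decode2 decode2 decode2_alt
  rw [decode2Go_eq_triple, decode2_pyRange_max, decode2_fold_split]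
  simp
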